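-- pv_equiv track=rewrite | github.com/haleyyew/integration_project_semantic_schema_matching | representation_transfer.py | enumerate_one_to_one_correspondences
-- ===== SOURCE A (Python) =====
-- import itertools
--
-- def get_pairs_for_table(many_to_many_mappings, table_name):
--     table_mappings = {}
--     for topic in many_to_many_mappings:
--         values = []
--         for value in many_to_many_mappings[topic]:
--             if value[0] == table_name:
--                 values.append(value)
--         table_mappings[topic] = values
--
--     return table_mappings
--
-- def enumerate_one_to_one_correspondences(many_to_many_mappings, tables):
--     set_of_one_to_one = {}
--
--     for table in tables:
--         table_mappings = get_pairs_for_table(many_to_many_mappings, table)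
--         input = []
--         topics_input = []
--         for topic in table_mappings:
--             input.append(table_mappings[topic]+[(table, None, 0)])
--             topics_input.append(topic)
--         dupl = list(itertools.product(*input))
--         unique = []
--         for matching in dupl:
--             duplicates = {}
--             for item in matching:
--                 if item[1] not in duplicates:
--                     duplicates[item[1]] = 1
--                 else:
--                     duplicates[item[1]] += 1
--
--             add = True
--             for item in duplicates:
--                 if item != None and duplicates[item] > 1:
--                     add = False
--
--             if add:
--                 unique.append(matching)
--
--         # pprint.pprint(unique)
--         set_of_one_to_one[table] = (unique, topics_input)
--
--     return set_of_one_to_one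
-- ===== SOURCE B (Python) =====
-- def enumerate_one_to_one_correspondences(many_to_many_mappings, tables):
--     # Index once: for each topic, group its values by table name.
--     topic_index = []  # list of (topic, {table_name: [values...]})
--     for topic, values in many_to_many_mappings.items():
--         by_table = {}
--         for value in values:
--             by_table.setdefault(value[0], []).append(value)
--         topic_index.append((topic, by_table))
--     topics = [t for t, _ in topic_index]
--
--     result = {}
--     for table in tables:
--         candidates = [bt.get(table, []) + [(table, None, 0)] for _, bt in topic_index]
--         matchings = []
--
--         def dfs(i, partial, used):
--             if i == len(candidates):
--                 matchings.append(tuple(partial))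
--                 return
--             for item in candidates[i]:
--                 name = item[1]
--                 if name is None:
--                     partial.append(item)
--                     dfs(i + 1, partial, used)
--                     partial.pop()
--                 elif name not in used:
--                     used.add(name)
--                     partial.append(item)
--                     dfs(i + 1, partial, used)
--                     partial.pop()
--                     used.remove(name)
--
--         dfs(0, [], set())
--         result[table] = (matchings, topics)
--     return result
-- ===== Notes on version B (the rewrite author's own statement) =====
-- stated objective: alternative
-- what changed: Replaces per-table full itertools.product enumeration followed by a per-matching counter-dict duplicate filter with a backtracking DFS that extends a matching topic by topic and prunes already-used column names as it goes, over a per-topic index grouped by table built in one pass; it trades the product+filter passes for recursion with an explicit used-name set.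
import Mathlib
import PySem

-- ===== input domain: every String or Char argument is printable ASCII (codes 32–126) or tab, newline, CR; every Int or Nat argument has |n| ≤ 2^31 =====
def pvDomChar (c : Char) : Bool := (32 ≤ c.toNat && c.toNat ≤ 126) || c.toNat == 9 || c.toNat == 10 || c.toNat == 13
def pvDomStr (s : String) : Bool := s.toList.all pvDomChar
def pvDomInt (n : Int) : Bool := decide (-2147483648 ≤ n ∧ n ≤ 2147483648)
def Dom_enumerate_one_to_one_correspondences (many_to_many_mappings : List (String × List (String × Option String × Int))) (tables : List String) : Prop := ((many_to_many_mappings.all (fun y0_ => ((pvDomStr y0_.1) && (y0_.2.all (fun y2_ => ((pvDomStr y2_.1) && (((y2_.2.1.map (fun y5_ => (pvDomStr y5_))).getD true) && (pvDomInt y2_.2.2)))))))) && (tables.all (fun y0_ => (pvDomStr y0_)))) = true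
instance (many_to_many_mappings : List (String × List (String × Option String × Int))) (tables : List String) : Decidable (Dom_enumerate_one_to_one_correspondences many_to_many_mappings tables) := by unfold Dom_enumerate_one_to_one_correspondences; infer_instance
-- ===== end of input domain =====

-- B: backtracking DFS with early pruning of reused column names and a one-pass per-topic
-- index grouped by table, instead of materialising the full product and filtering it.

-- ===== PORT A =====
-- helper get_pairs_for_table: filter each topic's values down to one table
def pvFilterTable (table : String) (vals : List (String × Option String × Int)) :
    List (String × Option String × Int) :=
  vals.foldl (fun acc v => if v.1 == table then acc ++ [v] else acc) []

def get_pairs_for_table (mmm : PySem.Dict String (List (String × Option String × Int)))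
    (table : String) : PySem.Dict String (List (String × Option String × Int)) :=
  mmm.items.foldl (fun tm tv => tm.insert tv.1 (pvFilterTable table tv.2)) PySem.Dict.empty

-- itertools.product over a list of candidate lists
def pvProduct (ls : List (List (String × Option String × Int))) :
    List (List (String × Option String × Int)) :=
  match ls with
  | [] => [[]]
  | c :: cs => c.flatMap (fun x => (pvProduct cs).map (x :: ·))

-- the 'duplicates' counting dict of A
def pvDupCounter (xs : List (Option String)) : PySem.Dict (Option String) Int :=
  xs.foldl (fun d x => if d.contains x = false then d.insert x 1
                       else d.insert x (d.getD x 0 + 1)) PySem.Dict.empty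

-- the 'add' flag of A
def pvAddCheck (m : List (String × Option String × Int)) : Bool :=
  let d := pvDupCounter (m.map (fun it => it.2.1))
  d.keys.foldl (fun add k => if k ≠ none ∧ d.getD k 0 > 1 then false else add) true

def enumerate_one_to_one_correspondences (many_to_many_mappings : List (String × List (String × Option String × Int))) (tables : List String) : List (String × (List (List (String × Option String × Int))) × List String) :=
  let mmm := PySem.Dict.ofList many_to_many_mappings
  let res := tables.foldl (fun s table =>
    let tm := get_pairs_for_table mmm table
    let pr := tm.items.foldl
      (fun (p : List (List (String × Option String × Int)) × List String) tv =>
        (p.1 ++ [tv.2 ++ [(table, none, (0 : Int))]], p.2 ++ [tv.1])) ([], [])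
    let dupl := pvProduct pr.1
    let unique := dupl.foldl (fun u matching =>
      if pvAddCheck matching then u ++ [matching] else u) []
    s.insert table (unique, pr.2)) PySem.Dict.empty
  res.items

-- ===== PORT B =====
-- one-pass grouping of a topic's values by their table name (dict.setdefault + append)
def pvGroupByTable (vals : List (String × Option String × Int)) :
    PySem.Dict String (List (String × Option String × Int)) :=
  vals.foldl (fun bt v => bt.modify v.1 [] (· ++ [v])) PySem.Dict.empty

-- backtracking DFS: extend the matching topic by topic, pruning already-used names
def pvDfs (cands : List (List (String × Option String × Int))) (used : PySem.Set String) :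
    List (List (String × Option String × Int)) :=
  match cands with
  | [] => [[]]
  | c :: cs => c.flatMap (fun item =>
      match item.2.1 with
      | none => (pvDfs cs used).map (item :: ·)
      | some n => if PySem.Set.contains used n then []
                  else (pvDfs cs (PySem.Set.add used n)).map (item :: ·))

def enumerate_one_to_one_correspondences_alt (many_to_many_mappings : List (String × List (String × Option String × Int))) (tables : List String) : List (String × (List (List (String × Option String × Int))) × List String) :=
  let d := PySem.Dict.ofList many_to_many_mappings
  let topicIndex := d.items.map (fun tv => (tv.1, pvGroupByTable tv.2))
  let topics := topicIndex.map (fun tb => tb.1)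
  let res := tables.foldl (fun s table =>
    let cands := topicIndex.map (fun tb =>
      tb.2.getD table [] ++ [(table, none, (0 : Int))])
    s.insert table (pvDfs cands PySem.Set.empty, topics)) PySem.Dict.empty
  res.items

-- ===== PRECONDITION & SPEC =====
def Spec_enumerate_one_to_one_correspondences (many_to_many_mappings : List (String × List (String × Option String × Int))) (tables : List String) (out : List (String × (List (List (String × Option String × Int))) × List String)) : Prop := out = enumerate_one_to_one_correspondences_alt many_to_many_mappings tables
instance (many_to_many_mappings : List (String × List (String × Option String × Int))) (tables : List String) (out : List (String × (List (List (String × Option String × Int))) × List String)) : Decidable (Spec_enumerate_one_to_one_correspondences many_to_many_mappings tables out) := by unfold Spec_enumerate_one_to_one_correspondences; exact @List.hasDecEq _ (@instDecidableEqProd _ _ inferInstance (@instDecidableEqProd _ _ inferInstance inferInstance)) _ _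

-- ===== CLAIM (what is proved, stated in full; the proofs are below) =====
def Claim_equal_enumerate_one_to_one_correspondences : Prop := ∀ (many_to_many_mappings : List (String × List (String × Option String × Int))) (tables : List String), Dom_enumerate_one_to_one_correspondences many_to_many_mappings tables → Spec_enumerate_one_to_one_correspondences many_to_many_mappings tables (enumerate_one_to_one_correspondences many_to_many_mappings tables)

-- ===== LEMMAS AND PROOFS =====
-- the sequence of non-None names picked by a matching, in order
def pvNames (m : List (String × Option String × Int)) : List String :=
  m.filterMap (fun it => it.2.1)

-- validity of a partial matching relative to already-used names (B's pruning test, unrolled)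
def pvOkFrom (used : PySem.Set String) : List (String × Option String × Int) → Bool
  | [] => true
  | it :: m => match it.2.1 with
    | none => pvOkFrom used m
    | some n => !PySem.Set.contains used n && pvOkFrom (PySem.Set.add used n) m

theorem pvDupCounter_eq_counter (xs : List (Option String)) :
    pvDupCounter xs = PySem.Dict.counter xs := by
  unfold pvDupCounter
  rw [← PySem.Dict.foldl_insert_getD_add_one_eq_counter]
  apply PySem.List.foldl_congr_mem
  intro d x hx
  by_cases h : d.contains x
  · simp [h]
  · have h' : d.contains x = false := by simpa using h
    have h0 : d.getD x 0 = 0 := PySem.Dict.getD_of_not_contains d 0 h'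
    simp [h', h0]

theorem pvFoldl_flag (P : Option String → Prop) [DecidablePred P]
    (l : List (Option String)) (acc : Bool) :
    l.foldl (fun a k => if P k then false else a) acc = (acc && l.all fun k => !decide (P k)) := by
  induction l generalizing acc with
  | nil => simp
  | cons k l ih =>
    rw [List.foldl_cons, ih]
    by_cases h : P k
    · simp [h]
    · simp [h]

theorem pvCount_filterMap_id (xs : List (Option String)) (n : String) :
    (xs.filterMap id).count n = xs.count (some n) := by
  induction xs with
  | nil => rfl
  | cons x xs ih =>
    cases x with
    | none => simpa [List.count_cons] using ih
    | some m => simpa [List.count_cons] using ih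

theorem pvAddCheck_iff (m : List (String × Option String × Int)) :
    pvAddCheck m = true ↔ (pvNames m).Nodup := by
  have hx : pvNames m = (m.map (fun it => it.2.1)).filterMap id := by
    simp [pvNames, List.filterMap_map]
  unfold pvAddCheck
  simp only [pvDupCounter_eq_counter]
  rw [pvFoldl_flag]
  simp only [Bool.true_and, List.all_eq_true, PySem.Dict.keys_counter,
    PySem.Dict.getD_counter, PySem.Set.mem_ofList, Bool.not_eq_eq_eq_not, Bool.not_true,
    decide_eq_false_iff_not, not_and, not_lt]
  rw [List.nodup_iff_count_le_one]
  constructor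
  · intro h n
    rw [hx, pvCount_filterMap_id]
    by_cases hm : (some n) ∈ m.map (fun it => it.2.1)
    · exact_mod_cast h (some n) hm (by simp)
    · rw [List.count_eq_zero.mpr hm]; omega
  · intro h k hk hne
    cases k with
    | none => simp at hne
    | some n =>
      have := h n
      rw [hx, pvCount_filterMap_id] at this
      exact_mod_cast this

theorem pvOkFrom_iff (m : List (String × Option String × Int)) (used : PySem.Set String) :
    pvOkFrom used m = true ↔ ((pvNames m).Nodup ∧ ∀ n ∈ pvNames m, ¬ n ∈ used) := by
  induction m generalizing used with
  | nil => simp [pvOkFrom, pvNames]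
  | cons it m ih =>
    cases hsnd : it.2.1 with
    | none =>
      simp only [pvOkFrom, hsnd, pvNames, List.filterMap_cons]
      exact ih used
    | some n =>
      have hc : ∀ (s : PySem.Set String) (x : String),
          ((!PySem.Set.contains s x) = true) = (x ∉ s) := by
        intro s x
        simp
      simp only [pvOkFrom, hsnd, pvNames, List.filterMap_cons, Bool.and_eq_true, hc, ih,
        List.nodup_cons, List.mem_cons, PySem.Set.mem_add]
      constructor
      · rintro ⟨hnu, hnd, hall⟩
        refine ⟨⟨fun hmem => (not_or.mp (hall n hmem)).2 rfl, hnd⟩, ?_⟩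
        intro x hx
        rcases hx with rfl | hx
        · exact hnu
        · exact (not_or.mp (hall x hx)).1
      · rintro ⟨⟨hnm, hnd⟩, hall⟩
        refine ⟨hall n (Or.inl rfl), hnd, ?_⟩
        intro x hx
        exact not_or.mpr ⟨hall x (Or.inr hx), fun hxn => hnm (hxn ▸ hx)⟩

theorem pvOkFrom_empty_eq_addCheck (m : List (String × Option String × Int)) :
    pvOkFrom PySem.Set.empty m = pvAddCheck m := by
  rw [Bool.eq_iff_iff, pvOkFrom_iff, pvAddCheck_iff]
  simp [PySem.Set.empty]

theorem pvDfs_eq_filter (cands : List (List (String × Option String × Int)))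
    (used : PySem.Set String) :
    pvDfs cands used = (pvProduct cands).filter (pvOkFrom used) := by
  induction cands generalizing used with
  | nil => simp [pvDfs, pvProduct, pvOkFrom]
  | cons c cs ih =>
    simp only [pvDfs, pvProduct, List.filter_flatMap]
    apply List.flatMap_congr
    intro item hmem
    cases h : item.2.1 with
    | none =>
      dsimp only
      rw [ih, List.filter_map]
      congr 1
      apply List.filter_congr
      intro m hm
      simp only [Function.comp_apply, pvOkFrom, h]
    | some n =>
      by_cases hc : PySem.Set.contains used n
      · have hnil : List.filter (pvOkFrom used ∘ fun x => item :: x) (pvProduct cs) = [] := by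
          rw [List.filter_eq_nil_iff]
          intro m hm
          simp only [Function.comp_apply, pvOkFrom, h, hc, Bool.not_true, Bool.false_and,
            Bool.false_eq_true, not_false_eq_true]
        rw [List.filter_map, hnil]
        dsimp only
        rw [hc]
        simp
      · have hc' : PySem.Set.contains used n = false := by simpa using hc
        dsimp only
        rw [hc', List.filter_map]
        simp only [Bool.false_eq_true, if_false, ih]
        congr 1
        apply List.filter_congr
        intro m hm
        simp only [Function.comp_apply, pvOkFrom, h, hc', Bool.not_false, Bool.true_and]

theorem pvGroupByTable_getD (vals : List (String × Option String × Int)) (t : String) :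
    (pvGroupByTable vals).getD t [] = vals.filter (fun v => v.1 == t) := by
  suffices h : ∀ (bt : PySem.Dict String (List (String × Option String × Int))),
      (vals.foldl (fun bt v => bt.modify v.1 [] (· ++ [v])) bt).getD t []
        = bt.getD t [] ++ vals.filter (fun v => v.1 == t) by
    simpa [PySem.Dict.getD_empty] using h PySem.Dict.empty
  induction vals with
  | nil => intro bt; simp
  | cons v vs ih =>
    intro bt
    rw [List.foldl_cons, ih]
    by_cases hv : v.1 = t
    · simp [hv]
    · simp [hv, PySem.Dict.getD_modify, Ne.symm hv]

theorem pvFilterTable_eq (t : String) (vals : List (String × Option String × Int)) :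
    pvFilterTable t vals = vals.filter (fun v => v.1 == t) := by
  unfold pvFilterTable
  rw [PySem.List.foldl_append_if_eq_filter]
  simp

theorem get_pairs_items (mmm : PySem.Dict String (List (String × Option String × Int)))
    (hk : mmm.keys.Nodup) (t : String) :
    (get_pairs_for_table mmm t).items
      = mmm.items.map (fun tv => (tv.1, pvFilterTable t tv.2)) := by
  unfold get_pairs_for_table
  rw [PySem.Dict.items_foldl_insert_fresh mmm.items (fun tv => tv.1)
    (fun tv => pvFilterTable t tv.2) PySem.Dict.empty
    (fun a _ => PySem.Dict.contains_empty a.1) hk]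
  simp [show PySem.Dict.empty.items = [] from rfl]

theorem pvPairFold (l : List (String × List (String × Option String × Int))) (t : String)
    (acc : List (List (String × Option String × Int)) × List String) :
    l.foldl (fun p tv => (p.1 ++ [tv.2 ++ [(t, none, (0 : Int))]], p.2 ++ [tv.1])) acc
      = (acc.1 ++ l.map (fun tv => tv.2 ++ [(t, none, (0 : Int))]), acc.2 ++ l.map (fun tv => tv.1)) := by
  induction l generalizing acc with
  | nil => simp
  | cons tv l ih => simp [List.foldl_cons, ih]

-- ===== VERDICT (by name: the statement is the Claim_ definition above) =====
theorem enumerate_one_to_one_correspondences_spec : Claim_equal_enumerate_one_to_one_correspondences := by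
  intro mmmL tables _
  unfold Spec_enumerate_one_to_one_correspondences
  unfold enumerate_one_to_one_correspondences enumerate_one_to_one_correspondences_alt
  dsimp only
  congr 1
  apply PySem.List.foldl_congr_mem
  intro s table _
  have hk : (PySem.Dict.ofList mmmL).keys.Nodup := PySem.Dict.nodup_keys_ofList mmmL
  rw [get_pairs_items (PySem.Dict.ofList mmmL) hk table, pvPairFold]
  rw [PySem.List.foldl_append_if_eq_filter]
  simp only [List.nil_append, List.map_map]
  have hcand : (PySem.Dict.ofList mmmL).items.map
        ((fun tb => tb.2.getD table [] ++ [(table, none, (0 : Int))]) ∘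
          fun tv => (tv.1, pvGroupByTable tv.2))
      = (PySem.Dict.ofList mmmL).items.map
          (fun tv => pvFilterTable table tv.2 ++ [(table, none, (0 : Int))]) := by
    apply List.map_congr_left
    intro tv _
    simp [Function.comp_apply, pvGroupByTable_getD, pvFilterTable_eq]
  rw [hcand, pvDfs_eq_filter]
  refine congrArg (s.insert table) ?_
  rw [Prod.mk.injEq]
  refine ⟨?_, rfl⟩
  apply List.filter_congr
  intro m hm
  exact (pvOkFrom_empty_eq_addCheck m).symm
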